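-- pv_equiv track=rewrite | github.com/xfree75/tvse_tk2td2pl | bin/tvsea-cnes.py | titleSplit
-- ===== SOURCE A (Python) =====
-- def titleSplit(title):
--     s1 = title.upper().split()
--
--     s2 = list()
--     for w in s1:
--         s2.extend(w.split("."))
--
--     s3 = list()
--     for w in s2:
--         s3.extend(w.split("-"))
--
--     s4 = list()
--     for w in s3:
--         s4.extend(w.split("_"))
--
--     #LOGGER.debug("s4: {}".format(s4))
--     return s4
-- ===== SOURCE B (Python) =====
-- def titleSplit(title):
--     # One character-level pass per whitespace word instead of three
--     # successive materializing split passes; same tokens, empties included.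
--     out = []
--     for w in title.upper().split():
--         cur = []
--         for c in w:
--             if c in '.-_':
--                 out.append(''.join(cur))
--                 cur = []
--             else:
--                 cur.append(c)
--         out.append(''.join(cur))
--     return out
-- ===== Notes on version B (the rewrite author's own statement) =====
-- stated objective: alternative
-- what changed: Replaces A's three successive whole-list split-and-extend passes (on '.', '-', '_') with a single character-level scan of each whitespace word that cuts at any of the three delimiters in one pass.
import Mathlib
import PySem

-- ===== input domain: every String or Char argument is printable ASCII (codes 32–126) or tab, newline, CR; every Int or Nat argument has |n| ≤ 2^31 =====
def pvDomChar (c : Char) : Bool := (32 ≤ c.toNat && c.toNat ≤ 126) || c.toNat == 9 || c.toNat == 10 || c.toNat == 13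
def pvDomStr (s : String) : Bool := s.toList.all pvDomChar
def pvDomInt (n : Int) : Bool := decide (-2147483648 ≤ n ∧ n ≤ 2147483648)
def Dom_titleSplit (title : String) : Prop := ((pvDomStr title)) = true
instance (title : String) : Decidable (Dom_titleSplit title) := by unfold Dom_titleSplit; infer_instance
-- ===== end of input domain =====

-- B replaces A's three successive split-and-extend passes with one character-level
-- scan per whitespace word cutting at any of '.', '-', '_' (alternative decomposition, same cost).


-- ===== PORT A =====
-- w.split(sep) for a nonempty separator (PySem.Chars.splitOn is exactly that form)
def pySplit (w sep : String) : List String :=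
  (PySem.Chars.splitOn w.toList sep.toList).map String.ofList

def titleSplit (title : String) : List String :=
  let s1 := PySem.Str.split₀ (PySem.Str.upper title)
  let s2 := s1.foldl (fun acc w => acc ++ pySplit w ".") []
  let s3 := s2.foldl (fun acc w => acc ++ pySplit w "-") []
  let s4 := s3.foldl (fun acc w => acc ++ pySplit w "_") []
  s4

-- ===== PORT B =====
def tsDelim (c : Char) : Bool := c == '.' || c == '-' || c == '_'

-- one whitespace word: scan its characters, cutting at each delimiter
def tsWord (out : List String) (w : String) : List String :=
  let st := w.toList.foldl
    (fun (p : List String × List Char) c =>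
      if tsDelim c then (p.1 ++ [String.ofList p.2], []) else (p.1, p.2 ++ [c]))
    (out, [])
  st.1 ++ [String.ofList st.2]

def titleSplit_alt (title : String) : List String :=
  (PySem.Str.split₀ (PySem.Str.upper title)).foldl tsWord []

-- ===== PRECONDITION & SPEC =====
def Spec_titleSplit (title : String) (out : List String) : Prop := out = titleSplit_alt title
instance (title : String) (out : List String) : Decidable (Spec_titleSplit title out) := by unfold Spec_titleSplit; infer_instance

-- ===== CLAIM (what is proved, stated in full; the proofs are below) =====
def Claim_equal_titleSplit : Prop := ∀ (title : String), Dom_titleSplit title → Spec_titleSplit title (titleSplit title)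

-- ===== LEMMAS AND PROOFS =====

-- split on a character predicate, keeping empty pieces (reference form):
-- splitPA returns (first piece, remaining pieces), splitP the full piece list
def splitPA (p : Char → Bool) : List Char → List Char × List (List Char)
  | [] => ([], [])
  | c :: cs =>
    let r := splitPA p cs
    if p c then ([], r.1 :: r.2) else (c :: r.1, r.2)

def splitP (p : Char → Bool) (cs : List Char) : List (List Char) :=
  (splitPA p cs).1 :: (splitPA p cs).2

theorem splitP_congr (p q : Char → Bool) (h : ∀ c, p c = q c) (cs : List Char) :
    splitPA p cs = splitPA q cs := by
  induction cs with
  | nil => rfl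
  | cons c cs ih => simp [splitPA, h c, ih]

-- A's fuel-based splitOn with a single-character separator IS splitP
theorem splitOn_go_single (d : Char) (l : List Char) :
    ∀ fuel, l.length ≤ fuel → ∀ cur acc,
      PySem.Chars.splitOn.go [d] fuel l cur acc
        = acc.reverse ++ (cur.reverse ++ (splitPA (· == d) l).1) :: (splitPA (· == d) l).2 := by
  induction l with
  | nil =>
    intro fuel _ cur acc
    cases fuel <;> simp [PySem.Chars.splitOn.go, splitPA]
  | cons c rest ih =>
    intro fuel hf cur acc
    cases fuel with
    | zero => simp at hf
    | succ fuel =>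
      have hf' : rest.length ≤ fuel := by simpa using hf
      by_cases hd : d = c
      · subst hd
        simp only [PySem.Chars.splitOn.go, List.isPrefixOf]
        rw [if_pos (by simp)]
        simp only [List.length_cons, List.length_nil, Nat.zero_add, List.drop_succ_cons,
          List.drop_zero]
        rw [ih fuel hf' [] (cur.reverse :: acc)]
        simp [splitPA]
      · simp only [PySem.Chars.splitOn.go, List.isPrefixOf]
        rw [if_neg (by simp; intro h; exact absurd h hd)]
        rw [ih fuel hf' (c :: cur) acc]
        simp [splitPA, Ne.symm hd]

theorem splitOn_single (cs : List Char) (d : Char) :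
    PySem.Chars.splitOn cs [d] = splitP (· == d) cs := by
  unfold PySem.Chars.splitOn splitP
  rw [splitOn_go_single d cs (cs.length + 1) (by omega) [] []]
  simp

-- sequential single-predicate splits compose into one split on the union predicate
theorem splitP_flatMap (p q : Char → Bool) (cs : List Char) :
    (splitP p cs).flatMap (splitP q) = splitP (fun c => p c || q c) cs := by
  induction cs with
  | nil => simp [splitP, splitPA]
  | cons c cs ih =>
    simp only [splitP, List.flatMap_cons] at ih ⊢
    injection ih with ih1 ih2
    rw [List.append_eq] at ih2
    by_cases hp : p c
    · simp [splitP, splitPA, hp, List.cons_append, ih1, ih2]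
    · by_cases hq : q c
      · simp [splitPA, hp, hq, List.cons_append, ih1, ih2]
      · simp [splitPA, hp, hq, List.cons_append, ih1, ih2]

-- B's inner character loop, characterized: it appends the split pieces (head extended by cur)
theorem inner_loop_eq (cs : List Char) :
    ∀ (acc : List String) (cur : List Char),
      (cs.foldl
        (fun (p : List String × List Char) c =>
          if tsDelim c then (p.1 ++ [String.ofList p.2], []) else (p.1, p.2 ++ [c]))
        (acc, cur)).1
      ++ [String.ofList (cs.foldl
        (fun (p : List String × List Char) c =>
          if tsDelim c then (p.1 ++ [String.ofList p.2], []) else (p.1, p.2 ++ [c]))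
        (acc, cur)).2]
      = acc ++ String.ofList (cur ++ (splitPA tsDelim cs).1)
          :: ((splitPA tsDelim cs).2.map String.ofList) := by
  induction cs with
  | nil => intro acc cur; simp [splitPA]
  | cons c cs ih =>
    intro acc cur
    by_cases hc : tsDelim c
    · simp only [List.foldl_cons, hc, if_true]
      rw [ih (acc ++ [String.ofList cur]) []]
      simp [splitPA, hc]
    · simp only [List.foldl_cons, hc]
      rw [if_neg (by simp)]
      rw [ih acc (cur ++ [c])]
      simp [splitPA, hc]

-- pushing the List Char → String map through one more split pass
theorem mapOf_flatMap (L : List (List Char)) (d : Char) :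
    (L.map String.ofList).flatMap
        (fun v => (PySem.Chars.splitOn v.toList [d]).map String.ofList)
      = (L.flatMap (splitP (· == d))).map String.ofList := by
  induction L with
  | nil => rfl
  | cons a L ih =>
    simp only [List.map_cons, List.flatMap_cons, ih, List.map_append]
    simp [String.toList_ofList, splitOn_single]

-- one word through A's three splits equals one pass of splitP tsDelim (mapped to String)
theorem word_eq (w : String) :
    ((pySplit w ".").flatMap (fun v => pySplit v "-")).flatMap (fun v => pySplit v "_")
      = (splitP tsDelim w.toList).map String.ofList := by
  simp only [pySplit]
  rw [show ("." : String).toList = ['.'] from rfl, show ("-" : String).toList = ['-'] from rfl,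
    show ("_" : String).toList = ['_'] from rfl]
  rw [splitOn_single, mapOf_flatMap, mapOf_flatMap, splitP_flatMap, splitP_flatMap]
  unfold splitP
  rw [splitP_congr _ tsDelim (fun c => by simp [tsDelim, Bool.or_assoc]) w.toList]

-- ===== VERDICT (by name: the statement is the Claim_ definition above) =====
theorem titleSplit_spec : Claim_equal_titleSplit := by
  intro title _
  unfold Spec_titleSplit titleSplit titleSplit_alt
  simp only [PySem.List.foldl_append_eq_flatMap, List.nil_append]
  have hB : tsWord = fun out w => out ++ (splitP tsDelim w.toList).map String.ofList := by
    funext out w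
    unfold tsWord
    exact (inner_loop_eq w.toList out []).trans (by simp [splitP])
  rw [hB, PySem.List.foldl_append_eq_flatMap, List.nil_append]
  rw [List.flatMap_assoc, List.flatMap_assoc]
  exact congrFun (congrArg List.flatMap (funext fun w => by
    rw [← List.flatMap_assoc]; exact word_eq w)) _
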